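-- pv_equiv track=rewrite | github.com/pypi-data/pypi-mirror-386 | packages/projectdump/projectdump-0.1.0-py3-none-any.whl/projectdump/filters.py | should_exclude_file
-- ===== SOURCE A (Python) =====
-- from typing import Set, Tuple, Union
--
-- def should_exclude_file(filename: str, exclude_files: Set[str]) -> bool:
--     filename_lower = filename.lower()
--     return any(
--         filename_lower == pattern.lower()
--         or (
--             pattern.startswith("*.")
--             and filename_lower.endswith(pattern[2:].lower())
--         )
--         for pattern in exclude_files
--     )
-- ===== SOURCE B (Python) =====
-- def should_exclude_file(filename, exclude_files):
--     fl = filename.lower()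
--     exact = {p.lower() for p in exclude_files}
--     if fl in exact:
--         return True
--     wild = {p[2:].lower() for p in exclude_files if p.startswith("*.")}
--     n = len(fl)
--     lengths = {len(s) for s in wild}
--     return any(L <= n and fl[n - L:] in wild for L in lengths)
-- ===== Notes on version B (the rewrite author's own statement) =====
-- stated objective: alternative
-- what changed: Instead of A's per-pattern endswith tests inside one any-generator, B builds a hash index (lowered exact-match set, lowered '*.'-suffix set, and the set of distinct suffix lengths) and answers by one exact-set lookup plus one filename-slice set lookup per distinct suffix length - the per-pattern endswith scan disappears.
import Mathlib
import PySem

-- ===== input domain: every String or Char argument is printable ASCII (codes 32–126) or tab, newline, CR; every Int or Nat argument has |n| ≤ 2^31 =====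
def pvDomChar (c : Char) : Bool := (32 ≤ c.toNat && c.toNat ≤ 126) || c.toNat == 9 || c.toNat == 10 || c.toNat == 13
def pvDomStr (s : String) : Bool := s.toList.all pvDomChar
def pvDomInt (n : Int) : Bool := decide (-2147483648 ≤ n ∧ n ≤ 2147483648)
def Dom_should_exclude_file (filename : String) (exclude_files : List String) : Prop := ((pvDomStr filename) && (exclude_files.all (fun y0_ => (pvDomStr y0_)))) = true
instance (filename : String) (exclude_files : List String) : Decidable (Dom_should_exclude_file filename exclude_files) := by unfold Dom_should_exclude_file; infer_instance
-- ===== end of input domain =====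

-- B replaces A's per-pattern endswith scan by a hash index: a lowered exact-match set, a lowered '*.'-suffix set and its set of distinct lengths; it answers with one exact lookup plus one filename-slice set lookup per distinct suffix length.

-- ===== PORT A =====
def should_exclude_file (filename : String) (exclude_files : List String) : Bool :=
  let filename_lower := PySem.Str.lower filename
  exclude_files.any (fun pattern =>
    (filename_lower == PySem.Str.lower pattern)
    || (PySem.Str.startswith pattern "*."
        && PySem.Str.endswith filename_lower (PySem.Str.lower (PySem.Str.slice pattern (some 2) none))))

-- ===== PORT B =====
def should_exclude_file_alt (filename : String) (exclude_files : List String) : Bool :=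
  let fl := PySem.Str.lower filename
  let exact : PySem.Set String := PySem.Set.ofList (exclude_files.map PySem.Str.lower)
  if PySem.Set.contains exact fl then true
  else
    let wild : PySem.Set String := PySem.Set.ofList
      ((exclude_files.filter (fun p => PySem.Str.startswith p "*.")).map
        (fun p => PySem.Str.lower (PySem.Str.slice p (some 2) none)))
    let n : Int := (PySem.Str.len fl : Int)
    let lengths : PySem.Set Int := PySem.Set.ofList (wild.map (fun s => ((PySem.Str.len s : Int))))
    lengths.any (fun L =>
      decide (L ≤ n) && PySem.Set.contains wild (PySem.Str.slice fl (some (n - L)) none))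

-- ===== PRECONDITION & SPEC =====
def Spec_should_exclude_file (filename : String) (exclude_files : List String) (out : Bool) : Prop := out = should_exclude_file_alt filename exclude_files
instance (filename : String) (exclude_files : List String) (out : Bool) : Decidable (Spec_should_exclude_file filename exclude_files out) := by unfold Spec_should_exclude_file; infer_instance

-- ===== CLAIM (what is proved, stated in full; the proofs are below) =====
def Claim_equal_should_exclude_file : Prop := ∀ (filename : String) (exclude_files : List String), Dom_should_exclude_file filename exclude_files → Spec_should_exclude_file filename exclude_files (should_exclude_file filename exclude_files)

-- ===== LEMMAS AND PROOFS =====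

-- a string t is an endswith-match of fl iff it is the slice fl[i:] for some 0 ≤ i ≤ len(fl)
lemma pv_endswith_iff_slice (fl t : String) :
    PySem.Str.endswith fl t = true ↔
      ∃ i : Int, (0 ≤ i ∧ i ≤ (fl.toList.length : Int)) ∧ t = PySem.Str.slice fl (some i) none := by
  constructor
  · intro h
    have hs : t.toList <:+ fl.toList := by
      simpa using (PySem.Chars.endswith_iff fl.toList t.toList).mp (by simpa using h)
    have hlen : t.toList.length ≤ fl.toList.length := hs.length_le
    refine ⟨((fl.toList.length - t.toList.length : Nat) : Int), ⟨by positivity, by omega⟩, ?_⟩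
    have hdrop : t.toList = fl.toList.drop (fl.toList.length - t.toList.length) :=
      List.suffix_iff_eq_drop.mp hs
    apply String.toList_injective
    rw [PySem.Str.toList_slice]
    simp [PySem.List.slice_from_natCast]
    exact hdrop
  · rintro ⟨i, ⟨h0, _⟩, rfl⟩
    have : (PySem.Str.slice fl (some i) none).toList <:+ fl.toList := by
      rw [PySem.Str.toList_slice]
      simp only [PySem.Chars.slice_eq_listSlice]
      rw [PySem.List.slice_from fl.toList h0]
      exact List.drop_suffix _ _
    simp only [PySem.Str.endswith_eq]
    exact (PySem.Chars.endswith_iff _ _).mpr this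

-- length of the slice fl[i:] for 0 ≤ i ≤ len(fl)
lemma pv_len_slice (fl : String) (i : Int) (h0 : 0 ≤ i) (hn : i ≤ (fl.toList.length : Int)) :
    ((PySem.Str.slice fl (some i) none).toList.length : Int) = (fl.toList.length : Int) - i := by
  rw [PySem.Str.toList_slice]
  simp only [PySem.Chars.slice_eq_listSlice]
  rw [PySem.List.slice_from fl.toList h0]
  simp only [List.length_drop]
  omega

-- ===== VERDICT (by name: the statement is the Claim_ definition above) =====
theorem should_exclude_file_spec : Claim_equal_should_exclude_file := by
  intro filename exclude_files _
  unfold Spec_should_exclude_file should_exclude_file should_exclude_file_alt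
  rw [Bool.eq_iff_iff]
  by_cases hc : PySem.Set.contains (PySem.Set.ofList (exclude_files.map PySem.Str.lower)) (PySem.Str.lower filename) = true
  · simp only [hc, if_true, iff_true]
    rw [PySem.Set.contains_iff, PySem.Set.mem_ofList, List.mem_map] at hc
    obtain ⟨p, hp, h⟩ := hc
    simp only [List.any_eq_true]
    exact ⟨p, hp, by simp [h]⟩
  · simp only [hc, Bool.false_eq_true, if_false]
    rw [PySem.Set.contains_iff, PySem.Set.mem_ofList] at hc
    simp only [List.mem_map, not_exists, not_and] at hc
    set fl := PySem.Str.lower filename with hfl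
    set wild := PySem.Set.ofList
      ((exclude_files.filter (fun p => PySem.Str.startswith p "*.")).map
        (fun p => PySem.Str.lower (PySem.Str.slice p (some 2) none))) with hwild
    constructor
    · intro hA
      rw [List.any_eq_true] at hA
      obtain ⟨p, hp, hcase⟩ := hA
      rw [Bool.or_eq_true, beq_iff_eq, Bool.and_eq_true] at hcase
      rcases hcase with h | ⟨h1, h2⟩
      · exact absurd h.symm (hc p hp)
      · set s := PySem.Str.lower (PySem.Str.slice p (some 2) none) with hsdef
        have hsw : s ∈ wild := by
          rw [hwild, PySem.Set.mem_ofList, List.mem_map]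
          exact ⟨p, List.mem_filter.mpr ⟨hp, h1⟩, rfl⟩
        obtain ⟨i, ⟨hi0, hin⟩, hslice⟩ := (pv_endswith_iff_slice fl s).mp h2
        have hlen : ((s.toList.length : Int)) = (fl.toList.length : Int) - i := by
          rw [hslice]; exact pv_len_slice fl i hi0 hin
        rw [List.any_eq_true]
        refine ⟨(PySem.Str.len s : Int), ?_, ?_⟩
        · rw [PySem.Set.mem_ofList, List.mem_map]
          exact ⟨s, hsw, rfl⟩
        · rw [Bool.and_eq_true, decide_eq_true_eq, PySem.Set.contains_iff]
          have hni : (PySem.Str.len fl : Int) - (PySem.Str.len s : Int) = i := by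
            simp only [PySem.Str.len_eq]; omega
          constructor
          · simp only [PySem.Str.len_eq]; omega
          · rw [hni, ← hslice]; exact hsw
    · intro hB
      rw [List.any_eq_true] at hB
      obtain ⟨L, hL, hf⟩ := hB
      rw [Bool.and_eq_true, decide_eq_true_eq, PySem.Set.contains_iff] at hf
      obtain ⟨hLn, hmem⟩ := hf
      have hL0 : (0 : Int) ≤ L := by
        rw [PySem.Set.mem_ofList, List.mem_map] at hL
        obtain ⟨s0, _, rfl⟩ := hL
        exact Int.natCast_nonneg _
      rw [hwild, PySem.Set.mem_ofList, List.mem_map] at hmem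
      obtain ⟨p, hpf, hslice⟩ := hmem
      obtain ⟨hp, h1⟩ := List.mem_filter.mp hpf
      rw [List.any_eq_true]
      refine ⟨p, hp, ?_⟩
      rw [Bool.or_eq_true, Bool.and_eq_true]
      refine Or.inr ⟨h1, ?_⟩
      apply (pv_endswith_iff_slice fl _).mpr
      refine ⟨(PySem.Str.len fl : Int) - L, ⟨?_, ?_⟩, hslice⟩
      · simp only [PySem.Str.len_eq] at hLn ⊢; omega
      · simp only [PySem.Str.len_eq]; omega
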